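-- pv_equiv track=rewrite | github.com/hrmorley34/prizmmethods | methodconv.py | convert_pn_part
-- ===== SOURCE A (Python) =====
-- BELLS = "1234567890ETABCDFGHJKLMNPQRSUVWYZ"
--
-- PN_CROSS = {"-", "X"}
--
-- PN_DOT = {"."}
--
-- def convert_pn_part(pn: str) -> list[int]:
--     cur_val = 0
--     pn_out: list[int] = []
--     for char in pn:
--         if char in PN_CROSS:
--             if cur_val:
--                 pn_out.append(cur_val)
--                 cur_val = 0
--             pn_out.append(0)
--         elif char in PN_DOT:
--             if cur_val:
--                 pn_out.append(cur_val)
--                 cur_val = 0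
--         else:
--             i = BELLS.index(char)
--             cur_val |= 1 << i
--     if cur_val:
--         pn_out.append(cur_val)
--     return pn_out
-- ===== SOURCE B (Python) =====
-- BELLS = "1234567890ETABCDFGHJKLMNPQRSUVWYZ"
--
--
-- def _tokens(pn):
--     """Split pn into tokens: '-'/'X' crosses and maximal runs of bell chars (dots separate)."""
--     toks = []
--     i, n = 0, len(pn)
--     while i < n:
--         c = pn[i]
--         if c in "-X":
--             toks.append(c)
--             i += 1
--         elif c == ".":
--             i += 1
--         else:
--             j = i
--             while j < n and pn[j] not in "-X.":
--                 j += 1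
--             toks.append(pn[i:j])
--             i = j
--     return toks
--
--
-- def _mask(tok):
--     m = 0
--     for c in tok:
--         m |= 1 << BELLS.index(c)
--     return m
--
--
-- def convert_pn_part(pn: str) -> list[int]:
--     return [0 if t in ("-", "X") else _mask(t) for t in _tokens(pn)]
-- ===== Notes on version B (the rewrite author's own statement) =====
-- stated objective: alternative
-- what changed: Replaces the char-by-char state machine with running accumulator by a two-phase tokenize-then-map: first split the string into tokens (single cross chars and maximal bell runs, dots acting only as separators), then map each token to 0 or to the OR-fold of its bell bits.
import Mathlib
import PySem

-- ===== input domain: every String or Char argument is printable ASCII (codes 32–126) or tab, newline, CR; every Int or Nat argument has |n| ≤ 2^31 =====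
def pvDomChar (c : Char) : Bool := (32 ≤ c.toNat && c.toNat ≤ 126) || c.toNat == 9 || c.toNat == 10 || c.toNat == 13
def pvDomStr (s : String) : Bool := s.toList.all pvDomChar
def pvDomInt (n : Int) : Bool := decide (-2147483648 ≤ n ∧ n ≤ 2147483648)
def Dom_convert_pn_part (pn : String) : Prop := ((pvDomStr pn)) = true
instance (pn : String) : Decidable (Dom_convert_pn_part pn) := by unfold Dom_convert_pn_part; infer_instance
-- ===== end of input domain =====

-- B tokenizes the string first (cross tokens / maximal bell runs, dots as separators) and then
-- maps tokens to values, instead of A's char-by-char state machine with a running accumulator.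


-- ===== PORT A =====
def pnBells : List Char := "1234567890ETABCDFGHJKLMNPQRSUVWYZ".toList

-- one iteration of A's for-loop over the state (cur_val, pn_out); BELLS.index(char) raises on
-- characters outside BELLS (excluded by Pre_), so the port reads it with a .getD default there
def pnStepA (st : Int × List Int) (c : Char) : Int × List Int :=
  if c = '-' ∨ c = 'X' then
    (0, (if st.1 ≠ 0 then st.2 ++ [st.1] else st.2) ++ [0])
  else if c = '.' then
    if st.1 ≠ 0 then (0, st.2 ++ [st.1]) else st
  else
    (PySem.Int.bor st.1 ((1 : Int) <<< ((PySem.List.index? pnBells c).getD 0)), st.2)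

def convert_pn_part (pn : String) : List Int :=
  let st := pn.toList.foldl pnStepA (0, [])
  if st.1 ≠ 0 then st.2 ++ [st.1] else st.2

-- ===== PORT B =====
def pnIsStop (c : Char) : Bool := c = '-' || c = 'X' || c = '.'

-- B's _tokens: cross chars are singleton tokens, dots are skipped, otherwise the maximal
-- run of non-stop characters is one token
def pnTokens : List Char → List (List Char)
  | [] => []
  | c :: rest =>
    if c = '-' ∨ c = 'X' then [c] :: pnTokens rest
    else if c = '.' then pnTokens rest
    else ((c :: rest).takeWhile (fun d => !pnIsStop d))
           :: pnTokens ((c :: rest).dropWhile (fun d => !pnIsStop d))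
  termination_by cs => cs.length
  decreasing_by
    · simp
    · simp
    · rename_i h1 h2
      have hc : (!pnIsStop c) = true := by
        simp [pnIsStop]
        exact ⟨⟨fun h => h1 (Or.inl h), fun h => h1 (Or.inr h)⟩, h2⟩
      simp only [List.dropWhile_cons, hc, if_pos]
      have := List.length_dropWhile_le (p := fun d => !pnIsStop d) (l := rest)
      simp; omega

-- B's _mask
def pnMask (tok : List Char) : Int :=
  tok.foldl (fun m c => PySem.Int.bor m ((1 : Int) <<< ((PySem.List.index? pnBells c).getD 0))) 0

def convert_pn_part_alt (pn : String) : List Int :=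
  (pnTokens pn.toList).map (fun t => if t = ['-'] ∨ t = ['X'] then 0 else pnMask t)

-- ===== PRECONDITION & SPEC =====
-- Python's BELLS.index(char) raises ValueError on any character that is neither a bell
-- symbol nor '-', 'X' or '.'; both A and B raise there, so Pre_ admits exactly the
-- strings over BELLS ∪ {'-','X','.'}.
def Pre_convert_pn_part (pn : String) : Prop :=
  (pn.toList.all (fun c => "1234567890ETABCDFGHJKLMNPQRSUVWYZ-X.".toList.contains c)) = true
instance (pn : String) : Decidable (Pre_convert_pn_part pn) := by
  unfold Pre_convert_pn_part; infer_instance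

def pvWitness_convert_pn_part : String := "12-5.34"

def Spec_convert_pn_part (pn : String) (out : List Int) : Prop := out = convert_pn_part_alt pn
instance (pn : String) (out : List Int) : Decidable (Spec_convert_pn_part pn out) := by unfold Spec_convert_pn_part; infer_instance

-- ===== CLAIM (what is proved, stated in full; the proofs are below) =====
def Claim_equal_convert_pn_part : Prop := ∀ (pn : String), Dom_convert_pn_part pn → Pre_convert_pn_part pn → Spec_convert_pn_part pn (convert_pn_part pn)

-- ===== LEMMAS AND PROOFS =====

-- a bell step keeps the accumulator positive
lemma pnBor_pos (m : Int) (i : Nat) (hm : 0 ≤ m) :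
    0 < PySem.Int.bor m ((1 : Int) <<< i) := by
  have h1 : ((1 : Int) <<< i) = ((2 ^ i : Nat) : Int) := by
    simp [Int.shiftLeft_eq]
  rw [h1, PySem.Int.bor_of_nonneg hm (by positivity)]
  have h2 : (2 ^ i : Nat) ≤ m.toNat ||| (2 ^ i : Nat) := Nat.right_le_or
  exact_mod_cast Nat.lt_of_lt_of_le (Nat.two_pow_pos i) h2

lemma pnMaskAux_pos (tok : List Char) (m : Int) (hm : 0 < m) :
    0 < tok.foldl (fun m c => PySem.Int.bor m ((1 : Int) <<< ((PySem.List.index? pnBells c).getD 0))) m := by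
  induction tok generalizing m with
  | nil => exact hm
  | cons c t ih => exact ih _ (pnBor_pos _ _ hm.le)

-- the accumulator after a run of bell chars is B's mask of that run, and the output is untouched
lemma pnRun_foldlAux (run : List Char) (hrun : ∀ c ∈ run, pnIsStop c = false)
    (m : Int) (out : List Int) :
    run.foldl pnStepA (m, out)
      = (run.foldl (fun m c => PySem.Int.bor m ((1 : Int) <<< ((PySem.List.index? pnBells c).getD 0))) m, out) := by
  induction run generalizing m with
  | nil => rfl
  | cons c t ih =>
    have hc := hrun c (by simp)
    have h1 : ¬(c = '-' ∨ c = 'X') := by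
      rintro (h | h) <;> simp [h, pnIsStop] at hc
    have h2 : ¬(c = '.') := by intro h; simp [h, pnIsStop] at hc
    simp only [List.foldl_cons, pnStepA, h1, h2, if_false]
    exact ih (fun d hd => hrun d (by simp [hd])) _

lemma pnRun_foldl (run : List Char) (hrun : ∀ c ∈ run, pnIsStop c = false) (out : List Int) :
    run.foldl pnStepA (0, out) = (pnMask run, out) := by
  rw [pnRun_foldlAux run hrun 0 out]; rfl

-- a stop char flushes a nonzero accumulator: stepping from (m, out) is stepping from (0, out ++ [m])
lemma pnFlush (m : Int) (out : List Int) (d : Char) (hm : m ≠ 0) (hd : pnIsStop d = true) :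
    pnStepA (m, out) d = pnStepA (0, out ++ [m]) d := by
  rcases (by simpa [pnIsStop] using hd : (d = '-' ∨ d = 'X') ∨ d = '.') with (h | h) | h <;>
    simp [pnStepA, h, hm]

-- main invariant: running A from accumulator 0 and pending output `out` produces
-- `out` followed by B's per-token values
lemma pnMain (cs : List Char) (out : List Int) :
    (let st := cs.foldl pnStepA (0, out); if st.1 ≠ 0 then st.2 ++ [st.1] else st.2)
      = out ++ (pnTokens cs).map (fun t => if t = ['-'] ∨ t = ['X'] then 0 else pnMask t) := by
  induction cs using pnTokens.induct generalizing out with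
  | case1 => simp [pnTokens]
  | case2 c rest hc ih =>
    have hst : pnStepA (0, out) c = (0, out ++ [0]) := by
      simp [pnStepA, hc]
    have hf : (if ([c] : List Char) = ['-'] ∨ ([c] : List Char) = ['X'] then (0:Int) else pnMask [c]) = 0 := by
      rcases hc with h | h <;> simp [h]
    rw [pnTokens]
    simp only [hc, if_true, List.foldl_cons, hst, List.map_cons, hf]
    rw [ih (out ++ [0])]
    simp
  | case3 rest h ih =>
    have hst : pnStepA (0, out) '.' = (0, out) := by
      simp [pnStepA]
    rw [pnTokens]
    simp only [h, if_false, List.foldl_cons, hst]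
    exact ih out
  | case4 c rest hc hdot ih =>
    have hcs : (!pnIsStop c) = true := by
      simp [pnIsStop]
      exact ⟨⟨fun h => hc (Or.inl h), fun h => hc (Or.inr h)⟩, hdot⟩
    have hsplit : (c :: rest)
        = (c :: rest).takeWhile (fun d => !pnIsStop d) ++ (c :: rest).dropWhile (fun d => !pnIsStop d) :=
      (List.takeWhile_append_dropWhile).symm
    have htake : ∀ d ∈ (c :: rest).takeWhile (fun d => !pnIsStop d), pnIsStop d = false := by
      intro d hd
      have := List.mem_takeWhile_imp hd
      simpa using this
    have hrunne : (c :: rest).takeWhile (fun d => !pnIsStop d) ≠ [] := by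
      rw [List.takeWhile_cons_of_pos (p := fun d => !pnIsStop d) (l := rest) hcs]
      simp
    conv_lhs => rw [hsplit]
    rw [List.foldl_append, pnRun_foldl ((c :: rest).takeWhile (fun d => !pnIsStop d)) htake out]
    have hmpos : 0 < pnMask ((c :: rest).takeWhile (fun d => !pnIsStop d)) := by
      rcases List.exists_cons_of_ne_nil hrunne with ⟨d, t, hd⟩
      rw [hd, pnMask, List.foldl_cons]
      exact pnMaskAux_pos t _ (pnBor_pos _ _ le_rfl)
    have hrunf : (if ((c :: rest).takeWhile (fun d => !pnIsStop d)) = ['-'] ∨ ((c :: rest).takeWhile (fun d => !pnIsStop d)) = ['X'] then (0:Int) else pnMask ((c :: rest).takeWhile (fun d => !pnIsStop d)))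
        = pnMask ((c :: rest).takeWhile (fun d => !pnIsStop d)) := by
      have hno : ∀ s : Char, pnIsStop s = true → ((c :: rest).takeWhile (fun d => !pnIsStop d)) ≠ [s] := by
        intro s hs habs
        have := htake s (by rw [habs]; simp)
        rw [hs] at this
        exact absurd this (by simp)
      rw [if_neg]
      rintro (h | h)
      · exact hno '-' (by decide) h
      · exact hno 'X' (by decide) h
    rw [pnTokens]
    simp only [hc, hdot, if_false, List.map_cons, hrunf]
    rcases hdrop : (c :: rest).dropWhile (fun d => !pnIsStop d) with _ | ⟨d, rest'⟩
    · simp only [List.foldl_nil]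
      have h0 : pnTokens ([] : List Char) = [] := by rw [pnTokens]
      simp [h0, hmpos.ne']
    · have hd : pnIsStop d = true := by
        have := List.head_dropWhile_not (fun d => !pnIsStop d) (l := (c :: rest)) (by simp [hdrop])
        simp only [hdrop, List.head_cons] at this
        simpa using this
      rw [hdrop] at ih
      rw [List.foldl_cons,
        pnFlush (pnMask ((c :: rest).takeWhile (fun d => !pnIsStop d))) out d hmpos.ne' hd,
        ← List.foldl_cons]
      rw [ih (out ++ [pnMask ((c :: rest).takeWhile (fun d => !pnIsStop d))])]
      simp

-- ===== VERDICT (by name: the statement is the Claim_ definition above) =====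
theorem convert_pn_part_spec : Claim_equal_convert_pn_part := by
  intro pn _ _
  unfold Spec_convert_pn_part convert_pn_part convert_pn_part_alt
  simpa using pnMain pn.toList []
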